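-- pv_equiv track=rewrite | github.com/wzygxr/shuati | class048_MaximumSubarray_HouseRobber/Code05_HouseRobberIV.py | _most_rob_optimized
-- ===== SOURCE A (Python) =====
-- from typing import List
--
-- def _most_rob_optimized(nums: List[int], ability: int) -> int:
--     """
--     空间优化版本：使用两个变量代替dp数组
--
--     时间复杂度：O(n)
--     空间复杂度：O(1)
--
--     Args:
--         nums: 房屋金额数组
--         ability: 窃取能力值
--
--     Returns:
--         int: 最多能偷的房屋数量
--     """
--     n = len(nums)
--     if n == 0:
--         return 0
--     if n == 1:
--         return 1 if nums[0] <= ability else 0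
--     if n == 2:
--         return 1 if (nums[0] <= ability or nums[1] <= ability) else 0
--
--     prepre = 1 if nums[0] <= ability else 0
--     pre = 1 if (nums[0] <= ability or nums[1] <= ability) else 0
--
--     for i in range(2, n):
--         steal_current = 1 if nums[i] <= ability else 0
--         current = max(pre, steal_current + prepre)
--         prepre, pre = pre, current
--
--     return pre
-- ===== SOURCE B (Python) =====
-- from typing import List
--
-- def _most_rob_optimized(nums: List[int], ability: int) -> int:
--     # Greedy left-to-right: take every eligible house whose predecessor was not taken.
--     count = 0
--     prev_taken = False
--     for v in nums:
--         if v <= ability and not prev_taken: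
--             count += 1
--             prev_taken = True
--         else:
--             prev_taken = False
--     return count
-- ===== Notes on version B (the rewrite author's own statement) =====
-- stated objective: simpler
-- what changed: Replaced the two-variable DP recurrence (with special cases for n==0/1/2) by a single greedy pass that takes every eligible house not adjacent to the previously taken one, carrying only a count and a boolean.
import Mathlib
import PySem

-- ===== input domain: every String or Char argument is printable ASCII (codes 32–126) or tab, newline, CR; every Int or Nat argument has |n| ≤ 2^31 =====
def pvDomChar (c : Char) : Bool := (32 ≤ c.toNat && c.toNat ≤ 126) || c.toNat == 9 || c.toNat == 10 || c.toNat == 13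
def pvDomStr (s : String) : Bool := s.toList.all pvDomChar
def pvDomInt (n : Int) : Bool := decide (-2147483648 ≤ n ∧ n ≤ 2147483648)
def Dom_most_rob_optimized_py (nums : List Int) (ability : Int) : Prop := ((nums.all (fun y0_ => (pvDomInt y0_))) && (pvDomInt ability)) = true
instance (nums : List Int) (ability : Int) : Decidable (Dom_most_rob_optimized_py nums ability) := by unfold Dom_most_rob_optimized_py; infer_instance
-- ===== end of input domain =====

-- B replaces A's two-variable DP (with n==0/1/2 special cases) by one greedy pass
-- carrying a count and a previous-taken flag; objective: simpler.

-- ===== PORT A =====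
def most_rob_optimized_py (nums : List Int) (ability : Int) : Int :=
  let n : Int := nums.length
  if n = 0 then 0
  else if n = 1 then (if PySem.List.pyGetD nums 0 0 ≤ ability then 1 else 0)
  else if n = 2 then
    (if PySem.List.pyGetD nums 0 0 ≤ ability ∨ PySem.List.pyGetD nums 1 0 ≤ ability then 1 else 0)
  else
    let prepre : Int := if PySem.List.pyGetD nums 0 0 ≤ ability then 1 else 0
    let pre : Int :=
      if PySem.List.pyGetD nums 0 0 ≤ ability ∨ PySem.List.pyGetD nums 1 0 ≤ ability then 1 else 0
    ((PySem.List.pyRange 2 n 1).foldl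
      (fun (s : Int × Int) i =>
        (s.2, max s.2 ((if PySem.List.pyGetD nums i 0 ≤ ability then (1:Int) else 0) + s.1)))
      (prepre, pre)).2

-- ===== PORT B =====
def most_rob_optimized_py_alt (nums : List Int) (ability : Int) : Int :=
  (nums.foldl
    (fun (s : Int × Bool) v =>
      if v ≤ ability ∧ ¬ s.2 then (s.1 + 1, true) else (s.1, false))
    (0, false)).1

-- ===== PRECONDITION & SPEC =====
def Spec_most_rob_optimized_py (nums : List Int) (ability : Int) (out : Int) : Prop := out = most_rob_optimized_py_alt nums ability
instance (nums : List Int) (ability : Int) (out : Int) : Decidable (Spec_most_rob_optimized_py nums ability out) := by unfold Spec_most_rob_optimized_py; infer_instance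

-- ===== CLAIM (what is proved, stated in full; the proofs are below) =====
def Claim_equal_most_rob_optimized_py : Prop := ∀ (nums : List Int) (ability : Int), Dom_most_rob_optimized_py nums ability → Spec_most_rob_optimized_py nums ability (most_rob_optimized_py nums ability)

-- ===== LEMMAS AND PROOFS =====

-- Loop invariant: A's DP pair is (c - t, c) where (c, t) is B's greedy state.
lemma pv_loop_eq (ab : Int) (l : List Int) (c : Int) (t : Bool) :
    (l.foldl
      (fun (s : Int × Int) v =>
        (s.2, max s.2 ((if v ≤ ab then (1:Int) else 0) + s.1)))
      (c - (if t then 1 else 0), c)).2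
    = (l.foldl
        (fun (s : Int × Bool) v =>
          if v ≤ ab ∧ ¬ s.2 then (s.1 + 1, true) else (s.1, false))
        (c, t)).1 := by
  induction l generalizing c t with
  | nil => simp
  | cons v l ih =>
    by_cases hv : v ≤ ab <;> cases t <;> simp only [List.foldl_cons, hv] <;> norm_num
    · rw [show (1:Int) + c = c + 1 by ring]
      simpa using ih (c + 1) true
    · simpa using ih c false
    · simpa using ih c false
    · simpa using ih c false

-- ===== VERDICT (by name: the statement is the Claim_ definition above) =====
theorem most_rob_optimized_py_spec : Claim_equal_most_rob_optimized_py := by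
  intro nums ability _
  show most_rob_optimized_py nums ability = most_rob_optimized_py_alt nums ability
  match nums with
  | [] => simp [most_rob_optimized_py, most_rob_optimized_py_alt]
  | [a0] =>
    by_cases h0 : a0 ≤ ability <;>
      simp [most_rob_optimized_py, most_rob_optimized_py_alt, PySem.List.pyGetD, h0]
  | [a0, a1] =>
    by_cases h0 : a0 ≤ ability <;> by_cases h1 : a1 ≤ ability <;>
      simp [most_rob_optimized_py, most_rob_optimized_py_alt, PySem.List.pyGetD, h0, h1]
  | a0 :: a1 :: a2 :: rest =>
    simp only [most_rob_optimized_py]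
    have h0' : ¬ (((a0 :: a1 :: a2 :: rest).length : Int) = 0) := by simp; omega
    have h1' : ¬ (((a0 :: a1 :: a2 :: rest).length : Int) = 1) := by simp; omega
    have h2' : ¬ (((a0 :: a1 :: a2 :: rest).length : Int) = 2) := by simp; omega
    rw [if_neg h0', if_neg h1', if_neg h2']
    have hfold := PySem.List.foldl_pyRange_pyGetD' (xs := a0 :: a1 :: a2 :: rest) (d := (0:Int))
      (f := fun (s : Int × Int) v =>
        (s.2, max s.2 ((if v ≤ ability then (1:Int) else 0) + s.1)))
      (init := (if PySem.List.pyGetD (a0 :: a1 :: a2 :: rest) 0 0 ≤ ability then (1:Int) else 0,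
        if PySem.List.pyGetD (a0 :: a1 :: a2 :: rest) 0 0 ≤ ability ∨
           PySem.List.pyGetD (a0 :: a1 :: a2 :: rest) 1 0 ≤ ability then (1:Int) else 0))
      (a := 2) (by norm_num)
    simp only [] at hfold
    rw [hfold]
    simp only [most_rob_optimized_py_alt]
    simp only [PySem.List.pyGetD_ofNat', List.getD, List.getElem?_cons_zero, List.getElem?_cons_succ, Option.getD_some, List.drop, Int.toNat]
    by_cases h0 : a0 ≤ ability <;> by_cases h1 : a1 ≤ ability <;>
      simp only [h0, h1, true_or, false_or, or_false, if_true, if_false, List.foldl_cons] <;> norm_num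
    · simpa using pv_loop_eq ability (a2 :: rest) 1 false
    · simpa using pv_loop_eq ability (a2 :: rest) 1 false
    · simpa using pv_loop_eq ability (a2 :: rest) 1 true
    · simpa using pv_loop_eq ability (a2 :: rest) 0 false
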